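-- pv_equiv track=rewrite | github.com/dash-app/pigent | util/ir.py | compress_wave
-- ===== SOURCE A (Python) =====
-- import collections
--
-- def compress_wave(code):
--     MAX_ENTRY = 600
--     MAX_LOOP = 20
--
--     if len(code) < MAX_ENTRY:
--         return code
--
--     def ngram(l, n):
--         return list(zip(*(l[i:] for i in range(n))))
--
--     # (start, size) => count(continuous)
--     dic = {}
--     for size in range(2, 8 + 1, 2):
--         # order by descending
--         freqs = collections.Counter(ngram(code, size)).most_common()
--         for block, count in freqs:
--             if count < 2:
--                 break
--             block = list(block)
--             for i in range(len(code) - size + 1):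
--                 if code[i:i+size] != block:
--                     continue
--                 # count continuous blocks
--                 for c in range(2, count + 1):
--                     if code[i+size*(c-1):i+size*c] == block:
--                         dic[(i, size)] = c
--                     else:
--                         break
--
--     # select compressable blocks
--     blocks = [(start, size, count) for (start, size),
--               count in dic.items() if count > 1 and size * count > 6]
--
--     if len(blocks) == 0:
--         return code
--
--     # order by efficiency
--     # => order by compressable length(descending), then by unit block size(ascending)
--     blocks = sorted(blocks, key=lambda b: (b[1] * b[2], -b[1]), reverse=True)
--
--     # excluding overlaps
--     cands = [0]
--     for i in range(1, len(blocks)):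
--         if len(cands) >= MAX_LOOP:
--             break
--         astart, asize, acount = blocks[i]
--         aend = astart + asize * acount - 1
--         valid = True
--         for j in cands:
--             bstart, bsize, bcount = blocks[j]
--             bend = bstart + bsize * bcount - 1
--             if astart <= bend and aend >= bstart:
--                 valid = False
--                 break
--         if valid:
--             cands.append(i)
--
--     # order by starting index
--     # then compressing blocks
--     for start, size, count in sorted([blocks[i] for i in cands], key=lambda b: b[0], reverse=True):
--         div, mod = count // 256, count % 256
--         code[start:start+size*count] = [255, 0] + \
--             code[start:start+size] + [255, 1, mod, div]
--
--     return code
-- ===== SOURCE B (Python) =====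
-- # B: same compression, but the (start,size)->run-count table is built in one
-- # linear backward pass per block size (run[i] from run[i+size]) plus one
-- # position-indexing pass, instead of A's per-ngram full rescans with a
-- # per-position quadratic copy-matching loop.  The final selection/splicing
-- # phases are unchanged.  Like A, mutates `code` in place via slice assignment.
-- def compress_wave(code):
--     MAX_ENTRY = 600
--     MAX_LOOP = 20
--
--     if len(code) < MAX_ENTRY:
--         return code
--
--     n = len(code)
--     dic = {}
--     for size in range(2, 8 + 1, 2):
--         # run.get(i, 1) = number of consecutive copies of code[i:i+size] at i
--         run = {}
--         for i in range(n - size, -1, -1):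
--             if code[i:i+size] == code[i+size:i+2*size]:
--                 run[i] = run.get(i + size, 1) + 1
--         # positions of each distinct block, in first-occurrence order
--         pos = {}
--         for i in range(n - size + 1):
--             pos.setdefault(tuple(code[i:i+size]), []).append(i)
--         # same order as Counter(...).most_common()
--         freqs = sorted([(b, len(ps)) for b, ps in pos.items()],
--                        key=lambda p: p[1], reverse=True)
--         for block, count in freqs:
--             if count < 2:
--                 break
--             for i in pos[block]:
--                 r = run.get(i, 1)
--                 if r >= 2:
--                     dic[(i, size)] = r
--
--     # select compressable blocks
--     blocks = [(start, size, count) for (start, size),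
--               count in dic.items() if count > 1 and size * count > 6]
--
--     if len(blocks) == 0:
--         return code
--
--     # order by efficiency
--     blocks = sorted(blocks, key=lambda b: (b[1] * b[2], -b[1]), reverse=True)
--
--     # excluding overlaps
--     cands = [0]
--     for i in range(1, len(blocks)):
--         if len(cands) >= MAX_LOOP:
--             break
--         astart, asize, acount = blocks[i]
--         aend = astart + asize * acount - 1
--         valid = True
--         for j in cands:
--             bstart, bsize, bcount = blocks[j]
--             bend = bstart + bsize * bcount - 1
--             if astart <= bend and aend >= bstart:
--                 valid = False
--                 break
--         if valid:
--             cands.append(i)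
--
--     # order by starting index, then compress
--     for start, size, count in sorted([blocks[i] for i in cands], key=lambda b: b[0], reverse=True):
--         div, mod = count // 256, count % 256
--         code[start:start+size*count] = [255, 0] + \
--             code[start:start+size] + [255, 1, mod, div]
--
--     return code
-- ===== Notes on version B (the rewrite author's own statement) =====
-- stated objective: faster
-- what changed: The (start,size)->run-count table is built by one linear backward pass per block size (run[i] from run[i+size]) plus a single position-indexing pass, instead of A's per-ngram full rescans of the code with a quadratic per-position copy-matching loop; the selection and splicing phases are unchanged.
import Mathlib
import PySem

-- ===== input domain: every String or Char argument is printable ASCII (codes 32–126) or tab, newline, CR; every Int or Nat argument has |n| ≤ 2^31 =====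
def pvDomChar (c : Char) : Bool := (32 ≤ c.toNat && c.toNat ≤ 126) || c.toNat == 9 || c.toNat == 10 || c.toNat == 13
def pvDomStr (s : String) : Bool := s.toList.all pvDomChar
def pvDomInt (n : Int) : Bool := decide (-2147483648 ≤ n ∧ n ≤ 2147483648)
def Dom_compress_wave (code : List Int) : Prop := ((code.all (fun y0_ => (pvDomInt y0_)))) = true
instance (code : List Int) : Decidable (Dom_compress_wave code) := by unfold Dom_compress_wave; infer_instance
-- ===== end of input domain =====

-- B replaces A's per-ngram full rescans (with a per-position copy-matching loop) by one linear
-- backward pass per block size computing consecutive-run counts; final phases are the same source.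
-- Both Pythons also mutate `code` in place identically; the theorems are about the return value.

-- ===== PORT A =====

-- zip(*iterables): emit a row of heads while every list is nonempty (exact semantics of zip over lists)
def pvZipStar (ls : List (List Int)) : List (List Int) :=
  if h : ls ≠ [] ∧ ∀ l ∈ ls, l ≠ [] then
    (ls.map (fun l => l.headD 0)) :: pvZipStar (ls.map (fun l => l.tail))
  else []
termination_by (ls.headD []).length
decreasing_by
  cases ls with
  | nil => exact absurd rfl h.1
  | cons a rest =>
    have ha : a ≠ [] := h.2 a (by simp)
    simp only [List.headD_cons]
    have : 0 < a.length := List.length_pos_iff.mpr ha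
    simp [List.length_tail]; omega

-- ngram(l, n) = list(zip(*(l[i:] for i in range(n)))); Python's n-tuples ported as List Int
def pvNgram (l : List Int) (n : Int) : List (List Int) :=
  pvZipStar ((PySem.List.pyRange 0 n 1).map (fun i => PySem.List.slice l (some i) none))

-- the innermost 'for c in range(2, count+1)' loop with its break
def pvInnerA (code block : List Int) (i size : Int) (dic : PySem.Dict (Int × Int) Int) :
    List Int → PySem.Dict (Int × Int) Int
  | [] => dic
  | c :: rest =>
    if PySem.List.slice code (some (i + size * (c - 1))) (some (i + size * c)) == block then
      pvInnerA code block i size (dic.insert (i, size) c) rest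
    else dic

-- the 'for i in range(len(code) - size + 1)' scan (continue on mismatching slice)
def pvScanA (code block : List Int) (size count : Int) (dic : PySem.Dict (Int × Int) Int) :
    PySem.Dict (Int × Int) Int :=
  (PySem.List.pyRange 0 (PySem.List.len code - size + 1) 1).foldl
    (fun dic i =>
      if PySem.List.slice code (some i) (some (i + size)) == block then
        pvInnerA code block i size dic (PySem.List.pyRange 2 (count + 1) 1)
      else dic) dic

-- 'for block, count in freqs' with break on count < 2 (block = list(block) is the identity here)
def pvFreqLoopA (code : List Int) (size : Int) (dic : PySem.Dict (Int × Int) Int) :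
    List (List Int × Int) → PySem.Dict (Int × Int) Int
  | [] => dic
  | (block, count) :: rest =>
    if count < 2 then dic
    else pvFreqLoopA code size (pvScanA code block size count dic) rest

def pvDicA (code : List Int) : PySem.Dict (Int × Int) Int :=
  (PySem.List.pyRange 2 (8 + 1) 2).foldl
    (fun dic size =>
      pvFreqLoopA code size dic
        (PySem.List.sorted (PySem.Dict.counter (pvNgram code size)).items (fun p => p.2) true))
    PySem.Dict.empty

-- ----- final phases, identical source text in Source A and Source B (shared helpers) -----

-- 'for j in cands: ... break' overlap test
def pvOverlapLoop (blocks : List (Int × Int × Int)) (astart aend : Int) : List Int → Bool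
  | [] => true
  | j :: rest =>
    let b := PySem.List.pyGetD blocks j (0, 0, 0)
    if astart ≤ b.1 + b.2.1 * b.2.2 - 1 && b.1 ≤ aend then false
    else pvOverlapLoop blocks astart aend rest

-- 'for i in range(1, len(blocks))' with break at MAX_LOOP = 20
def pvCandLoop (blocks : List (Int × Int × Int)) (cands : List Int) : List Int → List Int
  | [] => cands
  | i :: rest =>
    if (20 : Int) ≤ PySem.List.len cands then cands
    else
      let a := PySem.List.pyGetD blocks i (0, 0, 0)
      if pvOverlapLoop blocks a.1 (a.1 + a.2.1 * a.2.2 - 1) cands then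
        pvCandLoop blocks (cands ++ [i]) rest
      else pvCandLoop blocks cands rest

-- slice assignment code[start:start+size*count] = [255,0]+code[start:start+size]+[255,1,mod,div]
-- (exact for the nonnegative, in-order bounds these blocks have)
def pvSplice (sel : List (Int × Int × Int)) (code : List Int) : List Int :=
  sel.foldl (fun code b =>
    PySem.List.slice code none (some b.1) ++
      ([255, 0] ++ PySem.List.slice code (some b.1) (some (b.1 + b.2.1)) ++
        [255, 1, PySem.Int.mod b.2.2 256, PySem.Int.floordiv b.2.2 256]) ++
      PySem.List.slice code (some (b.1 + b.2.1 * b.2.2)) none) code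

def pvFinish (code : List Int) (dic : PySem.Dict (Int × Int) Int) : List Int :=
  let blocks := (dic.items.filter (fun p => 1 < p.2 && 6 < p.1.2 * p.2)).map
    (fun p => (p.1.1, p.1.2, p.2))
  if PySem.List.len blocks == 0 then code
  else
    let blocks := PySem.List.sorted2 blocks (fun b => b.2.1 * b.2.2) (fun b => -b.2.1) true
    let cands := pvCandLoop blocks [0] (PySem.List.pyRange 1 (PySem.List.len blocks) 1)
    pvSplice (PySem.List.sorted (cands.map (fun i => PySem.List.pyGetD blocks i (0, 0, 0)))
      (fun b => b.1) true) code

def compress_wave (code : List Int) : List Int :=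
  if PySem.List.len code < 600 then code else pvFinish code (pvDicA code)

-- ===== PORT B =====

-- run.get(i, 1) = number of consecutive copies of code[i:i+size] starting at i (backward pass)
def pvRunB (code : List Int) (size : Int) : PySem.Dict Int Int :=
  (PySem.List.pyRange (PySem.List.len code - size) (-1) (-1)).foldl
    (fun run i =>
      if PySem.List.slice code (some i) (some (i + size)) ==
          PySem.List.slice code (some (i + size)) (some (i + 2 * size)) then
        run.insert i (run.getD (i + size) 1 + 1)
      else run)
    PySem.Dict.empty

-- pos.setdefault(tuple(code[i:i+size]), []).append(i); Python's tuples ported as List Int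
def pvPosB (code : List Int) (size : Int) : PySem.Dict (List Int) (List Int) :=
  (PySem.List.pyRange 0 (PySem.List.len code - size + 1) 1).foldl
    (fun pos i =>
      pos.modify (PySem.List.slice code (some i) (some (i + size))) [] (fun l => l ++ [i]))
    PySem.Dict.empty

-- 'for i in pos[block]: r = run.get(i, 1); if r >= 2: dic[(i, size)] = r'
def pvEmitB (size : Int) (run : PySem.Dict Int Int) (dic : PySem.Dict (Int × Int) Int)
    (ps : List Int) : PySem.Dict (Int × Int) Int :=
  ps.foldl (fun dic i =>
    let r := run.getD i 1
    if 2 ≤ r then dic.insert (i, size) r else dic) dic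

-- 'for block, count in freqs' with break on count < 2
def pvFreqLoopB (size : Int) (run : PySem.Dict Int Int) (pos : PySem.Dict (List Int) (List Int))
    (dic : PySem.Dict (Int × Int) Int) : List (List Int × Int) → PySem.Dict (Int × Int) Int
  | [] => dic
  | (block, count) :: rest =>
    if count < 2 then dic
    else pvFreqLoopB size run pos (pvEmitB size run dic (pos.getD block [])) rest

def pvDicB (code : List Int) : PySem.Dict (Int × Int) Int :=
  (PySem.List.pyRange 2 (8 + 1) 2).foldl
    (fun dic size =>
      let run := pvRunB code size
      let pos := pvPosB code size
      pvFreqLoopB size run pos dic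
        (PySem.List.sorted (pos.items.map (fun p => (p.1, PySem.List.len p.2))) (fun p => p.2) true))
    PySem.Dict.empty

def compress_wave_alt (code : List Int) : List Int :=
  if PySem.List.len code < 600 then code else pvFinish code (pvDicB code)

-- ===== PRECONDITION & SPEC =====
def Spec_compress_wave (code : List Int) (out : List Int) : Prop := out = compress_wave_alt code
instance (code : List Int) (out : List Int) : Decidable (Spec_compress_wave code out) := by unfold Spec_compress_wave; infer_instance

-- ===== CLAIM (what is proved, stated in full; the proofs are below) =====
def Claim_equal_compress_wave : Prop := ∀ (code : List Int), Dom_compress_wave code → Spec_compress_wave code (compress_wave code)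

-- ===== LEMMAS AND PROOFS =====

-- Abbreviations for the terms both ports share (proof-only; the ports spell them out)
def pvSlc (code : List Int) (s i : Int) : List Int :=
  PySem.List.slice code (some i) (some (i + s))

def pvRng (code : List Int) (s : Int) : List Int :=
  PySem.List.pyRange 0 (PySem.List.len code - s + 1) 1

def pvMatch (code : List Int) (s i : Int) : Bool :=
  PySem.List.slice code (some i) (some (i + s)) ==
    PySem.List.slice code (some (i + s)) (some (i + 2 * s))

-- "c consecutive copies of the block at i"
def pvChain (code : List Int) (s i : Int) (c : Nat) : Prop :=
  ∀ k : Nat, k < c →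
    PySem.List.slice code (some (i + s * (k : Int))) (some (i + s * (k : Int) + s)) =
      pvSlc code s i

lemma pv_clamp (n : Nat) (a : Int) (h : 0 ≤ a) :
    PySem.List.clampIdx n a = min a.toNat n := by
  unfold PySem.List.clampIdx
  split_ifs with h1 <;> omega

lemma pv_slc_len (code : List Int) (s i : Int) (h0 : 0 ≤ i)
    (hin : i + s ≤ PySem.List.len code) (hs : 1 ≤ s) :
    (pvSlc code s i).length = s.toNat := by
  unfold pvSlc
  rw [PySem.List.length_slice, pv_clamp _ _ (by omega), pv_clamp _ _ h0]
  rw [PySem.List.len_eq] at hin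
  omega

lemma pv_slice_full_bound (code : List Int) (s a : Int) (hs : 1 ≤ s) (ha : 0 ≤ a)
    (h : (PySem.List.slice code (some a) (some (a + s))).length = s.toNat) :
    a + s ≤ PySem.List.len code := by
  rw [PySem.List.length_slice, pv_clamp _ _ (by omega), pv_clamp _ _ ha] at h
  rw [PySem.List.len_eq]
  omega

-- ----- ngram = the window list -----

lemma pv_zipstar_drops (m : Nat) (hm : 1 ≤ m) :
    ∀ l : List Int,
      pvZipStar ((List.range m).map (fun i => l.drop i)) =
        (List.range (l.length + 1 - m)).map (fun j => (l.drop j).take m) := by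
  intro l
  induction l with
  | nil =>
    rw [pvZipStar, dif_neg]
    · have h0 : ([] : List Int).length + 1 - m = 0 := by simp; omega
      rw [h0]
      simp
    · rintro ⟨-, h2⟩
      have := h2 ([] : List Int) (by
        refine List.mem_map.mpr ⟨0, ?_, by simp⟩
        simpa using hm)
      exact this rfl
  | cons x t ih =>
    have hlc : (x :: t).length = t.length + 1 := by simp
    by_cases hlen : (x :: t).length < m
    · rw [pvZipStar, dif_neg]
      · have h0 : (x :: t).length + 1 - m = 0 := by omega
        rw [h0]
        simp
      · rintro ⟨-, h2⟩
        have hmem : ((x :: t).drop (m - 1)) ∈ (List.range m).map (fun i => (x :: t).drop i) :=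
          List.mem_map.mpr ⟨m - 1, List.mem_range.mpr (by omega), rfl⟩
        have := h2 _ hmem
        apply this
        apply List.drop_eq_nil_of_le
        omega
    · rw [Nat.not_lt] at hlen
      rw [pvZipStar, dif_pos]
      · have hrow : ((List.range m).map (fun i => (x :: t).drop i)).map (fun l => l.headD 0)
            = (x :: t).take m := by
          rw [List.map_map]
          apply List.ext_getElem
          · simp
            omega
          · intro k hk1 hk2
            simp only [List.length_map, List.length_range] at hk1
            simp only [List.getElem_map, List.getElem_range, Function.comp_apply]
            rw [List.getElem_take]
            have hh : ((x :: t).drop k).headD 0 = ((x :: t).drop k).head?.getD 0 := by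
              cases (x :: t).drop k <;> simp
            rw [hh, List.head?_drop, List.getElem?_eq_getElem (by omega)]
            rfl
        have htail : ((List.range m).map (fun i => (x :: t).drop i)).map (fun l => l.tail)
            = (List.range m).map (fun i => t.drop i) := by
          rw [List.map_map]
          apply List.map_congr_left
          intro i _
          simp [List.tail_drop]
        rw [hrow, htail, ih]
        have hsucc : (x :: t).length + 1 - m = (t.length + 1 - m) + 1 := by omega
        rw [hsucc, List.range_succ_eq_map]
        simp only [List.map_cons, List.drop_zero, List.map_map]
        congr 1
      · constructor
        · apply List.ne_nil_of_length_pos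
          simp
          omega
        · intro l' hl'
          obtain ⟨i, hi, rfl⟩ := List.mem_map.mp hl'
          apply List.ne_nil_of_length_pos
          simp at hi ⊢
          omega

lemma pv_rng_eq (code : List Int) (s : Int) :
    pvRng code s = (List.range ((PySem.List.len code - s + 1).toNat)).map (fun (k : Nat) => (k : Int)) := by
  unfold pvRng
  rw [PySem.List.pyRange_one, show PySem.List.len code - s + 1 - 0 = PySem.List.len code - s + 1 by ring]
  apply List.map_congr_left
  intro k _
  omega

lemma pv_ngram_eq (code : List Int) (s : Int) (hs : 1 ≤ s) :
    pvNgram code s = (pvRng code s).map (fun i => pvSlc code s i) := by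
  unfold pvNgram
  have harg : (PySem.List.pyRange 0 s 1).map (fun i => PySem.List.slice code (some i) none)
      = (List.range s.toNat).map (fun i => code.drop i) := by
    rw [PySem.List.pyRange_one]
    have h0 : (s - 0).toNat = s.toNat := by omega
    rw [h0, List.map_map]
    apply List.map_congr_left
    intro k _
    simp [PySem.List.slice_from_natCast]
  rw [harg, pv_zipstar_drops s.toNat (by omega) code, pv_rng_eq]
  have hlen : (PySem.List.len code - s + 1).toNat = code.length + 1 - s.toNat := by
    rw [PySem.List.len_eq]; omega
  rw [hlen, List.map_map]
  apply List.map_congr_left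
  intro j _
  simp only [Function.comp_apply]
  unfold pvSlc
  have hc : (j : Int) + s = ((j + s.toNat : Nat) : Int) := by push_cast; omega
  rw [hc, PySem.List.slice_natCast]
  congr 1
  omega

-- ----- the position dictionary -----

lemma pv_pos_def (code : List Int) (s : Int) :
    pvPosB code s = (pvRng code s).foldl
      (fun pos i => pos.modify (pvSlc code s i) [] (fun l => l ++ [i])) PySem.Dict.empty := rfl

lemma pv_pos_keys (code : List Int) (s : Int) :
    (pvPosB code s).keys = PySem.Set.ofList ((pvRng code s).map (pvSlc code s)) := by
  rw [pv_pos_def]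
  rw [PySem.Dict.keys_foldl_modify_key (pvRng code s) (fun i => pvSlc code s i)
    ([] : List Int) (fun _ i => fun l => l ++ [i]) PySem.Dict.empty]
  rw [PySem.Dict.keys_empty]
  rfl

lemma pv_pos_nodup (code : List Int) (s : Int) : (pvPosB code s).keys.Nodup := by
  rw [pv_pos_def]
  exact PySem.Dict.nodup_keys_foldl_modify_key (pvRng code s) (fun i => pvSlc code s i)
    ([] : List Int) (fun _ i => fun l => l ++ [i]) PySem.Dict.empty
    (by rw [PySem.Dict.keys_empty]; exact List.nodup_nil)

lemma pv_pos_getD (code : List Int) (s : Int) (k : List Int) :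
    (pvPosB code s).getD k [] = (pvRng code s).filter (fun i => pvSlc code s i == k) := by
  rw [pv_pos_def, ← List.foldl_map (f := fun i => (pvSlc code s i, i))
    (g := fun (d : PySem.Dict (List Int) (List Int)) p => d.modify p.1 [] (fun l => l ++ [p.2]))]
  rw [PySem.Dict.getD_foldl_modify_append, PySem.Dict.getD_empty, List.nil_append,
    List.filter_map]
  rw [List.map_map]
  have h1 : ((fun (p : List Int × Int) => p.2) ∘ fun i => (pvSlc code s i, i)) = id := rfl
  rw [h1, List.map_id]
  rfl

lemma pv_count_filter (code : List Int) (s : Int) (k : List Int) :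
    ((List.count k ((pvRng code s).map (pvSlc code s))) : Int)
      = (((pvRng code s).filter (fun i => pvSlc code s i == k)).length : Int) := by
  congr 1
  rw [List.count_eq_countP, List.countP_map, List.countP_eq_length_filter]
  rfl

lemma pv_items_AB (code : List Int) (s : Int) (hs : 1 ≤ s) :
    (PySem.Dict.counter (pvNgram code s)).items
      = (pvPosB code s).items.map (fun p => (p.1, PySem.List.len p.2)) := by
  rw [PySem.Dict.items_counter, pv_ngram_eq code s hs,
    PySem.Dict.items_eq_map_keys _ (pv_pos_nodup code s) ([] : List Int), pv_pos_keys,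
    List.map_map]
  apply List.map_congr_left
  intro k _
  simp only [Function.comp_apply]
  rw [pv_pos_getD, PySem.List.len_eq, pv_count_filter]

-- ----- the run dictionary -----

lemma pv_run_spec (code : List Int) (s : Int) (hs : 1 ≤ s) :
    (∀ j : Int, j < 0 ∨ PySem.List.len code - s < j → (pvRunB code s).getD j 1 = 1) ∧
    (∀ j : Int, 0 ≤ j → j ≤ PySem.List.len code - s →
      ((pvRunB code s).getD j 1
          = if pvMatch code s j then (pvRunB code s).getD (j + s) 1 + 1 else 1)
        ∧ 1 ≤ (pvRunB code s).getD j 1) := by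
  set n := PySem.List.len code with hn
  set step : PySem.Dict Int Int → Int → PySem.Dict Int Int :=
    fun run i => if pvMatch code s i then run.insert i (run.getD (i + s) 1 + 1) else run
    with hstep
  have hrun : pvRunB code s
      = ((List.range ((n - s + 1).toNat)).map (fun (k : Nat) => (n - s) - (k : Int))).foldl step
          PySem.Dict.empty := by
    unfold pvRunB
    rw [PySem.List.pyRange_neg_one, show (n - s - (-1)) = n - s + 1 by ring, ← hn]
    apply PySem.List.foldl_congr_mem
    intro acc x _
    simp only [hstep, pvMatch]
    rfl
  have inv : ∀ m : Nat,
      (∀ j : Int, j ≤ n - s - m ∨ n - s < j →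
        (((List.range m).map (fun (k : Nat) => (n - s) - (k : Int))).foldl step PySem.Dict.empty).getD j 1 = 1) ∧
      (∀ j : Int, n - s - m < j → j ≤ n - s →
        ((((List.range m).map (fun (k : Nat) => (n - s) - (k : Int))).foldl step PySem.Dict.empty).getD j 1
            = if pvMatch code s j then
                (((List.range m).map (fun (k : Nat) => (n - s) - (k : Int))).foldl step PySem.Dict.empty).getD (j + s) 1 + 1
              else 1)
          ∧ 1 ≤ (((List.range m).map (fun (k : Nat) => (n - s) - (k : Int))).foldl step PySem.Dict.empty).getD j 1) := by
    intro m
    induction m with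
    | zero =>
      constructor
      · intro j _
        simp [PySem.Dict.getD_empty]
      · intro j h1 h2
        omega
    | succ m ih =>
      obtain ⟨ih1, ih2⟩ := ih
      set d := ((List.range m).map (fun (k : Nat) => (n - s) - (k : Int))).foldl step PySem.Dict.empty with hd
      have hstep1 : ((List.range (m + 1)).map (fun (k : Nat) => (n - s) - (k : Int))).foldl step PySem.Dict.empty
          = step d (n - s - m) := by
        rw [List.range_succ, List.map_append, List.foldl_append]
        simp only [List.map_cons, List.map_nil, List.foldl_cons, List.foldl_nil]
        rfl
      rw [hstep1]
      set i0 : Int := n - s - m with hi0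
      by_cases hM : pvMatch code s i0
      · have hd' : step d i0 = d.insert i0 (d.getD (i0 + s) 1 + 1) := by
          simp only [hstep, if_pos hM]
        rw [hd']
        have hne : ∀ j : Int, j ≠ i0 → (d.insert i0 (d.getD (i0 + s) 1 + 1)).getD j 1 = d.getD j 1 :=
          fun j hj => PySem.Dict.getD_insert_of_ne d _ _ hj
        have hself : (d.insert i0 (d.getD (i0 + s) 1 + 1)).getD i0 1 = d.getD (i0 + s) 1 + 1 :=
          PySem.Dict.getD_insert_self d _ _ _
        have his : 1 ≤ d.getD (i0 + s) 1 := by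
          by_cases hcase : i0 + s ≤ n - s
          · exact (ih2 (i0 + s) (by omega) hcase).2
          · rw [ih1 (i0 + s) (by omega)]
        constructor
        · intro j hj
          rw [hne j (by omega)]
          exact ih1 j (by omega)
        · intro j hj1 hj2
          by_cases hji : j = i0
          · rw [hji]
            have hjs : (d.insert i0 (d.getD (i0 + s) 1 + 1)).getD (i0 + s) 1 = d.getD (i0 + s) 1 :=
              hne (i0 + s) (by omega)
            rw [hself, hjs, if_pos hM]
            exact ⟨rfl, by omega⟩
          · have hj3 : i0 < j := by omega
            rw [hne j hji, hne (j + s) (by omega)]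
            exact ih2 j (by omega) hj2
      · have hd' : step d i0 = d := by simp only [hstep, if_neg hM]
        rw [hd']
        constructor
        · intro j hj
          exact ih1 j (by omega)
        · intro j hj1 hj2
          by_cases hji : j = i0
          · rw [hji]
            have h1 : d.getD i0 1 = 1 := ih1 i0 (by omega)
            rw [h1, if_neg hM]
            exact ⟨rfl, le_refl 1⟩
          · exact ih2 j (by omega) hj2
  obtain ⟨h1, h2⟩ := inv ((n - s + 1).toNat)
  constructor
  · intro j hj
    rw [hrun]
    exact h1 j (by omega)
  · intro j hj0 hjn
    rw [hrun]
    exact h2 j (by omega) hjn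

lemma pv_chain_one (code : List Int) (s i : Int) : pvChain code s i 1 := by
  intro k hk
  have : k = 0 := by omega
  subst this
  simp [pvSlc]

lemma pv_chain_split (code : List Int) (s i : Int) (c : Nat) :
    pvChain code s i (c + 1) ↔ (pvChain code s i c ∧
      PySem.List.slice code (some (i + s * (c : Int))) (some (i + s * (c : Int) + s))
        = pvSlc code s i) := by
  constructor
  · intro h
    exact ⟨fun k hk => h k (by omega), h c (by omega)⟩
  · rintro ⟨h1, h2⟩ k hk
    by_cases hkc : k = c
    · subst hkc; exact h2
    · exact h1 k (by omega)

lemma pv_chain_iff (code : List Int) (s : Int) (hs : 1 ≤ s) :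
    ∀ (c : Nat) (i : Int), 0 ≤ i → i ≤ PySem.List.len code - s →
      (pvChain code s i c ↔ (c : Int) ≤ (pvRunB code s).getD i 1) := by
  obtain ⟨hout, hrec⟩ := pv_run_spec code s hs
  intro c
  induction c with
  | zero =>
    intro i h0 hin
    constructor
    · intro _
      have := (hrec i h0 hin).2
      omega
    · intro _ k hk
      omega
  | succ c ih =>
    intro i h0 hin
    have hrc := (hrec i h0 hin).1
    by_cases hM : pvMatch code s i
    · have heq : PySem.List.slice code (some (i + s)) (some (i + 2 * s)) = pvSlc code s i := by
        unfold pvMatch at hM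
        exact (beq_iff_eq.mp hM).symm
      have hlen1 : (pvSlc code s i).length = s.toNat := pv_slc_len code s i h0 (by omega) hs
      have hbound : i + 2 * s ≤ PySem.List.len code := by
        have hl := congrArg List.length heq
        rw [hlen1] at hl
        have := pv_slice_full_bound code s (i + s) hs (by omega)
          (by rw [show i + s + s = i + 2 * s by ring]; exact hl)
        omega
      have hIH := ih (i + s) (by omega) (by omega)
      have hslc' : pvSlc code s (i + s) = pvSlc code s i := by
        unfold pvSlc
        rw [show i + s + s = i + 2 * s by ring]
        exact heq
      have hshift : pvChain code s i (c + 1) ↔ pvChain code s (i + s) c := by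
        constructor
        · intro h k hk
          have h2 := h (k + 1) (by omega)
          rw [hslc']
          have e1 : i + s * ((k : Int) + 1) = i + s + s * (k : Int) := by ring
          push_cast at h2
          rw [e1] at h2
          exact h2
        · intro h k hk
          match k with
          | 0 => simp [pvSlc]
          | (k' + 1) =>
            have h2 := h k' (by omega)
            rw [hslc'] at h2
            have e1 : i + s + s * (k' : Int) = i + s * ((k' : Int) + 1) := by ring
            rw [e1] at h2
            push_cast
            exact h2
      rw [hshift, hIH, hrc, if_pos hM]
      push_cast
      omega
    · have h1 : (pvRunB code s).getD i 1 = 1 := by rw [hrc, if_neg hM]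
      rw [h1]
      constructor
      · intro hch
        by_cases hc : c = 0
        · subst hc; norm_num
        · exfalso
          apply hM
          have h2 := hch 1 (by omega)
          unfold pvMatch
          rw [beq_iff_eq]
          have e1 : i + s * ((1 : Nat) : Int) = i + s := by simp
          rw [e1, show i + s + s = i + 2 * s by ring] at h2
          exact h2.symm
      · intro hle
        have hc0 : c = 0 := by omega
        subst hc0
        exact pv_chain_one code s i
  
lemma pv_run_le_filter (code : List Int) (s : Int) (hs : 1 ≤ s) (i : Int)
    (h0 : 0 ≤ i) (hin : i ≤ PySem.List.len code - s) :
    (pvRunB code s).getD i 1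
      ≤ (((pvRng code s).filter (fun j => pvSlc code s j == pvSlc code s i)).length : Int) := by
  obtain ⟨hout, hrec⟩ := pv_run_spec code s hs
  set R := (pvRunB code s).getD i 1 with hR
  have hR1 : 1 ≤ R := (hrec i h0 hin).2
  have hch : pvChain code s i R.toNat :=
    (pv_chain_iff code s hs R.toNat i h0 hin).mpr (by omega)
  have hlen1 : (pvSlc code s i).length = s.toNat := pv_slc_len code s i h0 (by omega) hs
  have hsub : ((List.range R.toNat).map (fun (k : Nat) => i + s * (k : Int)))
      ⊆ (pvRng code s).filter (fun j => pvSlc code s j == pvSlc code s i) := by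
    intro x hx
    obtain ⟨k, hk, rfl⟩ := List.mem_map.mp hx
    have hkr := List.mem_range.mp hk
    have hel := hch k hkr
    have hx0 : (0 : Int) ≤ i + s * (k : Int) := by
      have : (0 : Int) ≤ s * (k : Int) := mul_nonneg (by omega) (by positivity)
      omega
    have hxel : pvSlc code s (i + s * (k : Int)) = pvSlc code s i := hel
    have hxb : i + s * (k : Int) + s ≤ PySem.List.len code := by
      apply pv_slice_full_bound code s _ hs hx0
      have := congrArg List.length hxel
      rw [hlen1] at this
      exact this
    rw [List.mem_filter]
    constructor
    · unfold pvRng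
      rw [PySem.List.mem_pyRange_one]
      omega
    · rw [beq_iff_eq]
      exact hxel
  have hnd : ((List.range R.toNat).map (fun (k : Nat) => i + s * (k : Int))).Nodup := by
    apply List.Nodup.map _ List.nodup_range
    intro a b hab
    have hab' : i + s * (a : Int) = i + s * (b : Int) := hab
    have : s * (a : Int) = s * (b : Int) := by omega
    have := mul_left_cancel₀ (show s ≠ 0 by omega) this
    omega
  have hle := (hnd.subperm hsub).length_le
  rw [List.length_map, List.length_range] at hle
  omega

-- ----- the inner 'count continuous copies' loop collapses to the run value -----

lemma pv_innerA_run (code : List Int) (s : Int) (hs : 1 ≤ s) (block : List Int)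
    (count i : Int) (h0 : 0 ≤ i) (hin : i ≤ PySem.List.len code - s)
    (hb : pvSlc code s i = block)
    (hRc : (pvRunB code s).getD i 1 ≤ count) (hc2 : 2 ≤ count)
    (dic : PySem.Dict (Int × Int) Int) :
    pvInnerA code block i s dic (PySem.List.pyRange 2 (count + 1) 1)
      = if 2 ≤ (pvRunB code s).getD i 1 then
          dic.insert (i, s) ((pvRunB code s).getD i 1)
        else dic := by
  obtain ⟨hout, hrec⟩ := pv_run_spec code s hs
  set R := (pvRunB code s).getD i 1 with hR
  have hR1 : 1 ≤ R := (hrec i h0 hin).2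
  have hchain : ∀ c : Nat, pvChain code s i c ↔ (c : Int) ≤ R :=
    fun c => pv_chain_iff code s hs c i h0 hin
  -- a chain element, in loop-variable form
  have hel : ∀ c : Int, 2 ≤ c → c ≤ R →
      PySem.List.slice code (some (i + s * (c - 1))) (some (i + s * c)) = block := by
    intro c hc2' hcR
    have hch : pvChain code s i c.toNat := (hchain c.toNat).mpr (by omega)
    have h2 := hch (c.toNat - 1) (by omega)
    rw [hb] at h2
    have e1 : ((c.toNat - 1 : Nat) : Int) = c - 1 := by omega
    rw [e1] at h2
    rw [show i + s * (c - 1) + s = i + s * c by ring] at h2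
    exact h2
  have helneg : ∀ c : Int, 2 ≤ c → R < c → R = c - 1 →
      ¬ (PySem.List.slice code (some (i + s * (c - 1))) (some (i + s * c)) = block) := by
    intro c hc2' hcR hprev habs
    have hch : pvChain code s i c.toNat := by
      have hsplit := pv_chain_split code s i (c.toNat - 1)
      have e0 : c.toNat - 1 + 1 = c.toNat := by omega
      rw [e0] at hsplit
      apply hsplit.mpr
      constructor
      · exact (hchain (c.toNat - 1)).mpr (by omega)
      · have e1 : ((c.toNat - 1 : Nat) : Int) = c - 1 := by omega
        rw [e1, hb]
        rw [show i + s * (c - 1) + s = i + s * c by ring]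
        exact habs
    have := (hchain c.toNat).mp hch
    omega
  by_cases h2R : 2 ≤ R
  · rw [if_pos h2R]
    -- main loop: from c₀ with c₀ ≤ R, the loop inserts R
    have key : ∀ (t : Nat), ∀ (c₀ : Int) (dic : PySem.Dict (Int × Int) Int),
        2 ≤ c₀ → c₀ + t = R →
        pvInnerA code block i s dic (PySem.List.pyRange c₀ (count + 1) 1)
          = dic.insert (i, s) R := by
      intro t
      induction t with
      | zero =>
        intro c₀ dic hc₀ hsum
        have hc₀R : c₀ = R := by omega
        rw [PySem.List.pyRange_one_cons (by omega)]
        simp only [pvInnerA]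
        rw [if_pos (beq_iff_eq.mpr (hel c₀ hc₀ (by omega)))]
        by_cases hRcount : R = count
        · rw [PySem.List.pyRange_one_eq_nil (by omega)]
          simp only [pvInnerA]
          rw [hc₀R]
        · rw [PySem.List.pyRange_one_cons (by omega)]
          simp only [pvInnerA]
          rw [if_neg]
          · rw [hc₀R]
          · intro habs
            exact helneg (c₀ + 1) (by omega) (by omega) (by omega)
              (beq_iff_eq.mp (by simpa using habs))
      | succ t iht =>
        intro c₀ dic hc₀ hsum
        rw [PySem.List.pyRange_one_cons (by omega)]
        simp only [pvInnerA]
        rw [if_pos (beq_iff_eq.mpr (hel c₀ hc₀ (by omega)))]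
        rw [iht (c₀ + 1) _ (by omega) (by push_cast; omega)]
        exact PySem.Dict.insert_insert_self dic (i, s) c₀ R
    exact key (R - 2).toNat 2 dic (by omega) (by omega)
  · rw [if_neg h2R]
    have hR1' : R = 1 := by omega
    rw [PySem.List.pyRange_one_cons (by omega)]
    simp only [pvInnerA]
    rw [if_neg]
    intro habs
    exact helneg 2 (by omega) (by omega) (by omega) (beq_iff_eq.mp (by simpa using habs))

-- ----- the per-block scan of A equals the position-list emission of B -----

lemma pv_scan_emit (code : List Int) (s : Int) (hs : 1 ≤ s) (block : List Int) (count : Int)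
    (hcnt : count = (((pvRng code s).filter (fun i => pvSlc code s i == block)).length : Int))
    (hc2 : 2 ≤ count) (dic : PySem.Dict (Int × Int) Int) :
    pvScanA code block s count dic
      = pvEmitB s (pvRunB code s) dic ((pvPosB code s).getD block []) := by
  rw [pv_pos_getD]
  unfold pvScanA pvEmitB
  rw [← List.foldl_filter
    (p := fun i => PySem.List.slice code (some i) (some (i + s)) == block)
    (f := fun dic i => pvInnerA code block i s dic (PySem.List.pyRange 2 (count + 1) 1))]
  have hfe : (PySem.List.pyRange 0 (PySem.List.len code - s + 1) 1).filter
      (fun i => PySem.List.slice code (some i) (some (i + s)) == block)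
      = (pvRng code s).filter (fun i => pvSlc code s i == block) := rfl
  rw [hfe]
  apply PySem.List.foldl_congr_mem
  intro acc x hx
  rw [List.mem_filter] at hx
  obtain ⟨hxr, hxp⟩ := hx
  have hxb : 0 ≤ x ∧ x < PySem.List.len code - s + 1 := by
    have := hxr
    unfold pvRng at this
    exact PySem.List.mem_pyRange_one.mp this
  have hxe : pvSlc code s x = block := beq_iff_eq.mp hxp
  have hRc : (pvRunB code s).getD x 1 ≤ count := by
    rw [hcnt]
    have h1 := pv_run_le_filter code s hs x hxb.1 (by omega)
    rw [hxe] at h1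
    exact h1
  rw [pv_innerA_run code s hs block count x hxb.1 (by omega) hxe hRc hc2 acc]

-- ----- the frequency loops agree -----

lemma pv_freq_AB (code : List Int) (s : Int) (hs : 1 ≤ s) (freqs : List (List Int × Int))
    (hf : ∀ p ∈ freqs,
      p.2 = (((pvRng code s).filter (fun i => pvSlc code s i == p.1)).length : Int)) :
    ∀ dic : PySem.Dict (Int × Int) Int,
      pvFreqLoopA code s dic freqs
        = pvFreqLoopB s (pvRunB code s) (pvPosB code s) dic freqs := by
  induction freqs with
  | nil => intro dic; rfl
  | cons p rest ih =>
    intro dic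
    obtain ⟨block, count⟩ := p
    simp only [pvFreqLoopA, pvFreqLoopB]
    by_cases h2 : count < 2
    · rw [if_pos h2, if_pos h2]
    · rw [if_neg h2, if_neg h2,
        pv_scan_emit code s hs block count (hf _ List.mem_cons_self) (by omega) dic]
      exact ih (fun q hq => hf q (List.mem_cons_of_mem _ hq)) _

lemma pv_size_AB (code : List Int) (s : Int) (hs : 1 ≤ s)
    (dic : PySem.Dict (Int × Int) Int) :
    pvFreqLoopA code s dic
        (PySem.List.sorted (PySem.Dict.counter (pvNgram code s)).items (fun p => p.2) true)
      = pvFreqLoopB s (pvRunB code s) (pvPosB code s) dic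
          (PySem.List.sorted ((pvPosB code s).items.map (fun p => (p.1, PySem.List.len p.2)))
            (fun p => p.2) true) := by
  rw [← pv_items_AB code s hs]
  apply pv_freq_AB code s hs
  intro p hp
  have hp' : p ∈ (PySem.Dict.counter (pvNgram code s)).items :=
    (PySem.List.mem_sorted _ _ _ _).mp hp
  rw [PySem.Dict.items_counter, pv_ngram_eq code s hs] at hp'
  obtain ⟨k, hk, rfl⟩ := List.mem_map.mp hp'
  simpa using pv_count_filter code s k

theorem pvDicAB (code : List Int) : pvDicA code = pvDicB code := by
  unfold pvDicA pvDicB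
  have h4 : PySem.List.pyRange 2 (8 + 1) 2 = [2, 4, 6, 8] := by decide
  rw [h4]
  simp only [List.foldl_cons, List.foldl_nil]
  rw [pv_size_AB code 2 (by norm_num), pv_size_AB code 4 (by norm_num),
    pv_size_AB code 6 (by norm_num), pv_size_AB code 8 (by norm_num)]

-- ===== VERDICT (by name: the statement is the Claim_ definition above) =====
theorem compress_wave_spec : Claim_equal_compress_wave := by
  intro code _
  unfold Spec_compress_wave compress_wave compress_wave_alt
  rw [pvDicAB]
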